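-- pv_equiv track=rewrite | github.com/kelsonchua/Makerspace-friendlies | Mapping.py | translate_dir_to_steps
-- ===== SOURCE A (Python) =====
-- def translate_dir_to_steps(path_steps):
--     # path_steps looks like ['N', 'W', 'S']
--
--     # Directions ordered N, E, S, W
--     directions = ['N', 'E', 'S', 'W']
--
--     execution_steps = []
--     local_orientation = orientation
--     for target_dir in path_steps:
--         # Convert absolute target_dir to relative turn (L, R, F, B)
--         # Then call explore(turn) and forward()
--         if directions[local_orientation] == target_dir:
--             execution_steps.append('F')
--         elif directions[(local_orientation - 1) % 4] == target_dir:
--             execution_steps.append('L')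
--             local_orientation = (local_orientation - 1) % 4
--         elif directions[(local_orientation + 1) % 4] == target_dir:
--             execution_steps.append('R')
--             local_orientation = (local_orientation + 1) % 4
--         elif directions[(local_orientation + 2) % 4] == target_dir:
--             execution_steps.append('B')
--             local_orientation = (local_orientation + 2) % 4
--
--     return execution_steps
--
-- orientation = 2 # 0=North, 1=East, 2=South, 3=West
-- ===== SOURCE B (Python) =====
-- def translate_dir_to_steps(path_steps):
--     # Staged passes: no running-orientation accumulator.  First project the
--     # known absolute directions to their indices, then read each turn off the
--     # adjacent pair of indices (the orientation after a known step is exactly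
--     # its index, so pairs of consecutive indices determine every turn).
--     directions = ['N', 'E', 'S', 'W']
--     turns = ['F', 'R', 'B', 'L']
--     idxs = [directions.index(d) for d in path_steps if d in directions]
--     prevs = [orientation] + idxs[:-1]
--     return [turns[(cur - prev) % 4] for prev, cur in zip(prevs, idxs)]
--
-- orientation = 2 # 0=North, 1=East, 2=South, 3=West
-- ===== Notes on version B (the rewrite author's own statement) =====
-- stated objective: alternative
-- what changed: Replaces A's single stateful pass (running orientation updated through a four-branch rotation cascade) by stateless staged passes: project the known directions to their index sequence, pair it with its own one-step shift, and map each adjacent index pair to a turn via (cur - prev) % 4.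
import Mathlib
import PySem

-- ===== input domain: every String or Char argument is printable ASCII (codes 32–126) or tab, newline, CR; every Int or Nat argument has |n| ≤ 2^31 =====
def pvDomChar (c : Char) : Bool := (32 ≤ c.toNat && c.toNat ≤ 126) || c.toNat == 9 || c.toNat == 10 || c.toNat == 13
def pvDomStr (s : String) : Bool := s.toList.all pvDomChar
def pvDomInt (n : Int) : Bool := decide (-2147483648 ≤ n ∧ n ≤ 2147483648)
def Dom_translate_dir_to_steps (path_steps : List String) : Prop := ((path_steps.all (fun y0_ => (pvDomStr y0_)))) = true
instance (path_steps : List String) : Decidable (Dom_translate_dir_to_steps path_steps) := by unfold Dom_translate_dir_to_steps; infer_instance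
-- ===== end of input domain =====

-- B replaces A's stateful pass (running orientation + four-branch cascade) by stateless
-- staged passes: known-direction index sequence, zipped with its one-step shift, mapped
-- through a (cur - prev) % 4 turn table (objective: alternative).

-- ===== PORT A =====
-- module-level global: orientation = 2
def pv_orientation : Int := 2

-- loop body of A (directions[...] via pyGet?; every index used is literally i % 4 or the
-- running orientation, which stays in 0..3, so the Option comparison is exact)
def pvStepA (st : List String × Int) (target_dir : String) : List String × Int :=
  let directions : List String := ["N", "E", "S", "W"]
  let ex := st.1
  let lo := st.2
  if PySem.List.pyGet? directions lo = some target_dir then (ex ++ ["F"], lo)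
  else if PySem.List.pyGet? directions (PySem.Int.mod (lo - 1) 4) = some target_dir then
    (ex ++ ["L"], PySem.Int.mod (lo - 1) 4)
  else if PySem.List.pyGet? directions (PySem.Int.mod (lo + 1) 4) = some target_dir then
    (ex ++ ["R"], PySem.Int.mod (lo + 1) 4)
  else if PySem.List.pyGet? directions (PySem.Int.mod (lo + 2) 4) = some target_dir then
    (ex ++ ["B"], PySem.Int.mod (lo + 2) 4)
  else (ex, lo)

def translate_dir_to_steps (path_steps : List String) : List String :=
  (path_steps.foldl pvStepA ([], pv_orientation)).1

-- ===== PORT B =====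
def pvDirs : List String := ["N", "E", "S", "W"]
def pvTurns : List String := ["F", "R", "B", "L"]

-- '[directions.index(d) for d in path_steps if d in directions]': the membership guard
-- makes .index total, so the comprehension is exactly a filterMap over index?
def pvIdxs (path_steps : List String) : List Int :=
  path_steps.filterMap (fun d => (PySem.List.index? pvDirs d).map Int.ofNat)

-- 'turns[(cur - prev) % 4]': the modular delta is always in 0..3, so the .getD "" default never fires
def pvTurnAt (pc : Int × Int) : String :=
  (PySem.List.pyGet? pvTurns (PySem.Int.mod (pc.2 - pc.1) 4)).getD ""

def translate_dir_to_steps_alt (path_steps : List String) : List String :=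
  let idxs := pvIdxs path_steps
  let prevs := (2 : Int) :: idxs.dropLast      -- [orientation] + idxs[:-1]
  (prevs.zip idxs).map pvTurnAt

-- ===== PRECONDITION & SPEC =====
def Spec_translate_dir_to_steps (path_steps : List String) (out : List String) : Prop := out = translate_dir_to_steps_alt path_steps
instance (path_steps : List String) (out : List String) : Decidable (Spec_translate_dir_to_steps path_steps out) := by unfold Spec_translate_dir_to_steps; infer_instance

-- ===== CLAIM (what is proved, stated in full; the proofs are below) =====
def Claim_equal_translate_dir_to_steps : Prop := ∀ (path_steps : List String), Dom_translate_dir_to_steps path_steps → Spec_translate_dir_to_steps path_steps (translate_dir_to_steps path_steps)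

-- ===== LEMMAS AND PROOFS =====

-- B's staged output, started at orientation lo, unfolds one turn per known index.
lemma pvStaged_cons (lo i : Int) (xs : List Int) :
    (((lo :: (i :: xs).dropLast).zip (i :: xs)).map pvTurnAt) =
      pvTurnAt (lo, i) :: (((i :: xs.dropLast).zip xs).map pvTurnAt) := by
  cases xs <;> simp

-- A's fold, started at any orientation in 0..3, produces B's staged turns.
lemma pvFoldA_staged (l : List String) (ex : List String) (lo : Int)
    (h : lo = 0 ∨ lo = 1 ∨ lo = 2 ∨ lo = 3) :
    (l.foldl pvStepA (ex, lo)).1 =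
      ex ++ (((lo :: (pvIdxs l).dropLast).zip (pvIdxs l)).map pvTurnAt) := by
  induction l generalizing ex lo with
  | nil => simp [pvIdxs]
  | cons t l ih =>
      by_cases hmem : t = "N" ∨ t = "E" ∨ t = "S" ∨ t = "W"
      · -- known direction: A appends one turn and moves to the index; B peels one pair
        have : ∀ i : Int, (i = 0 ∨ i = 1 ∨ i = 2 ∨ i = 3) →
            pvStepA (ex, lo) t = (ex ++ [pvTurnAt (lo, i)], i) →
            pvIdxs (t :: l) = i :: pvIdxs l →
            (List.foldl pvStepA (ex, lo) (t :: l)).1 =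
              ex ++ (((lo :: (pvIdxs (t :: l)).dropLast).zip (pvIdxs (t :: l))).map pvTurnAt) := by
          intro i hi hstep hidx
          rw [List.foldl_cons, hstep, hidx, pvStaged_cons, ih _ _ hi]
          simp
        rcases h with rfl | rfl | rfl | rfl <;> rcases hmem with rfl | rfl | rfl | rfl <;>
          first
          | exact this 0 (by omega) rfl rfl
          | exact this 1 (by omega) rfl rfl
          | exact this 2 (by omega) rfl rfl
          | exact this 3 (by omega) rfl rfl
      · -- unknown direction: A skips, B's first stage drops it
        push Not at hmem
        obtain ⟨hN, hE, hS, hW⟩ := hmem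
        have hA : pvStepA (ex, lo) t = (ex, lo) := by
          rcases h with rfl | rfl | rfl | rfl <;>
            simp [pvStepA, PySem.List.pyGet?, PySem.List.pyIdx?, PySem.Int.mod,
              Ne.symm hN, Ne.symm hE, Ne.symm hS, Ne.symm hW]
        have hidx : pvIdxs (t :: l) = pvIdxs l := by
          have hn : PySem.List.index? pvDirs t = none := by
            rw [PySem.List.index?_eq_none_iff]; simp [pvDirs, hN, hE, hS, hW]
          rw [PySem.List.index?_eq_idxOf?] at hn
          simp [pvIdxs, hn]
        rw [List.foldl_cons, hA, hidx, ih _ _ h]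

-- ===== VERDICT (by name: the statement is the Claim_ definition above) =====
theorem translate_dir_to_steps_spec : Claim_equal_translate_dir_to_steps := by
  intro path_steps _
  show _ = _
  unfold translate_dir_to_steps translate_dir_to_steps_alt pv_orientation
  rw [pvFoldA_staged _ _ _ (by omega)]
  simp
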